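-- pv_equiv track=rewrite | github.com/fergie2/522Lab1 | newparser.py | count_reachable_states
-- ===== SOURCE A (Python) =====
-- from collections import deque
--
-- def count_reachable_states(graph, start_state, max_transitions):
--     reachable_counts = [0] * (max_transitions + 1)
--     queue = deque([(start_state, 0)])
--     visited = set()
--     while queue:
--         current_state, transitions = queue.popleft()
--         if transitions <= max_transitions:
--             reachable_counts[transitions] += 1
--             if current_state not in visited:
--                 visited.add(current_state)
--                 for neighbor in graph.get(current_state, []):
--                     queue.append((neighbor, transitions + 1))
--     for i in range(1, max_transitions + 1):
--         reachable_counts[i] += reachable_counts[i - 1]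
--     return reachable_counts
-- ===== SOURCE B (Python) =====
-- def count_reachable_states(graph, start_state, max_transitions):
--     # Phase 1: standard BFS building a distance table; each node enqueued once.
--     dist = {start_state: 0}
--     queue = [start_state]
--     i = 0
--     while i < len(queue):
--         u = queue[i]
--         i += 1
--         du = dist[u]
--         for v in graph.get(u, []):
--             if v not in dist:
--                 dist[v] = du + 1
--                 queue.append(v)
--     # Phase 2: aggregate out-degrees by discovery depth (arrivals at depth d+1).
--     result = [0] * (max_transitions + 1)
--     if max_transitions >= 0:
--         result[0] = 1
--     for u, d in dist.items():
--         if d < max_transitions: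
--             result[d + 1] += len(graph.get(u, []))
--     # Phase 3: cumulative totals.
--     total = 0
--     out = []
--     for c in result:
--         total += c
--         out.append(total)
--     return out
-- ===== Notes on version B (the rewrite author's own statement) =====
-- stated objective: alternative
-- what changed: A counts every queued arrival per depth with a deque of (state, depth) pairs and duplicate enqueues; B instead runs a standard BFS in which each node is enqueued exactly once to build a distance table, then derives the per-depth arrival counts in a separate pass by summing out-degrees of nodes grouped by their distance (plus 1 for the start state), and accumulates.
import Mathlib
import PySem

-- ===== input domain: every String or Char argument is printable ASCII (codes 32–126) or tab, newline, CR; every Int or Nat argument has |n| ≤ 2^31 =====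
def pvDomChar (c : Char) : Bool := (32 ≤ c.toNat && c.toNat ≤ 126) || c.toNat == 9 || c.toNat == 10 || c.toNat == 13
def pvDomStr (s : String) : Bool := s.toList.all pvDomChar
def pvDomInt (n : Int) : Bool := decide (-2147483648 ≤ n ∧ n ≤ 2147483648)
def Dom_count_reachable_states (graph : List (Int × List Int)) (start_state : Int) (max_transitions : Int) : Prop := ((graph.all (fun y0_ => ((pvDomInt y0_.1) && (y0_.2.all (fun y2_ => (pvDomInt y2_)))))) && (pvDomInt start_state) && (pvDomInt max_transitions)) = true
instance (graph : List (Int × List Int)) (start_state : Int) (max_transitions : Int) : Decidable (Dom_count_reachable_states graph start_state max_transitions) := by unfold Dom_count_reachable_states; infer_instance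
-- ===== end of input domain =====

-- B replaces A's duplicate-counting deque of (state, depth) pairs by a standard one-visit BFS that
-- builds a distance table, then aggregates out-degrees by distance (objective: alternative, same cost).

-- ===== PORT A =====
-- reachable_counts[transitions] += 1 : 'transitions' is always 0 ≤ t < len(counts) when executed
-- (it starts at 0, only grows, and the guard t ≤ max holds), where .toNat indexing is exact.
def pvIncAt (c : List Int) (i : Int) : List Int :=
  c.set i.toNat (c.getD i.toNat 0 + 1)

-- termination measure helper: number of graph keys (with multiplicity) not yet visited
def pvUnvisKeys (graph : List (Int × List Int)) (visited : PySem.Set Int) : Nat :=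
  ((graph.map Prod.fst).filter (fun k => !(PySem.Set.contains visited k))).length

-- strict decrease of the measure when an unvisited element is marked visited (used for termination of
-- pvLoopA and, on the B side, of pvBfs)
theorem pvFilter_length_lt {l : List Int} {p q : Int → Bool}
    (himp : ∀ x, q x = true → p x = true) {a : Int} (ha : a ∈ l)
    (hp : p a = true) (hq : q a = false) :
    (l.filter q).length < (l.filter p).length := by
  induction l with
  | nil => cases ha
  | cons b t ih =>
    rcases List.mem_cons.mp ha with rfl | hb
    · simp only [List.filter_cons, hp, hq]
      calc (t.filter q).length ≤ (t.filter p).length := by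
            apply List.Sublist.length_le
            exact List.monotone_filter_right t (by intro x hx; exact himp x hx)
        _ < (t.filter p).length + 1 := Nat.lt_succ_self _
    · simp only [List.filter_cons]
      cases hqb : q b with
      | false => cases hpb : p b with
        | false => exact ih hb
        | true => exact Nat.lt_succ_of_lt (ih hb)
      | true =>
        rw [himp b hqb]
        simpa using Nat.succ_lt_succ (ih hb)

theorem pvContains_add_self (visited : PySem.Set Int) (cur : Int) :
    (visited.add cur).contains cur = true :=
  (PySem.Set.contains_iff _ _).mpr ((PySem.Set.mem_add _ _ _).mpr (Or.inr rfl))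

theorem pvContains_add_ne (visited : PySem.Set Int) (cur x : Int) (hne : x ≠ cur) :
    (visited.add cur).contains x = visited.contains x := by
  rw [Bool.eq_iff_iff, PySem.Set.contains_iff, PySem.Set.contains_iff, PySem.Set.mem_add]
  exact ⟨fun hm => hm.resolve_right hne, Or.inl⟩

theorem pvUnvis_lt (graph : List (Int × List Int)) (visited : PySem.Set Int) (cur : Int)
    (hnv : ¬ visited.contains cur = true) (hk : cur ∈ graph.map Prod.fst) :
    pvUnvisKeys graph (visited.add cur) < pvUnvisKeys graph visited := by
  apply pvFilter_length_lt (a := cur) (p := fun k => !(PySem.Set.contains visited k))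
      (q := fun k => !(PySem.Set.contains (visited.add cur) k))
  · intro x hx
    simp only [Bool.not_eq_eq_eq_not, Bool.not_true] at hx ⊢
    rw [Bool.eq_false_iff] at hx ⊢
    intro h
    exact hx ((PySem.Set.contains_iff _ _).mpr
      ((PySem.Set.mem_add _ _ _).mpr (Or.inl ((PySem.Set.contains_iff _ _).mp h))))
  · exact hk
  · simpa using hnv
  · simp only [Bool.not_eq_eq_eq_not, Bool.not_false]
    exact pvContains_add_self visited cur

theorem pvGetD_nil (graph : List (Int × List Int)) (cur : Int)
    (h : ¬ cur ∈ graph.map Prod.fst) : (PySem.Dict.mk graph).getD cur [] = [] := by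
  apply PySem.Dict.getD_of_not_contains
  rw [PySem.Dict.contains_mk]
  simp only [List.any_eq_false]
  intro p hp he
  exact h ((beq_iff_eq.mp he) ▸ List.mem_map_of_mem hp)

theorem pvUnvis_eq_of_not_key (graph : List (Int × List Int)) (visited : PySem.Set Int)
    (cur : Int) (h : ¬ cur ∈ graph.map Prod.fst) :
    pvUnvisKeys graph (visited.add cur) = pvUnvisKeys graph visited := by
  unfold pvUnvisKeys
  congr 1
  apply List.filter_congr
  intro x hx
  have hne : x ≠ cur := fun he => h (he ▸ hx)
  rw [pvContains_add_ne visited cur x hne]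

-- the while loop of A: queue of (state, transitions) pairs, visited set, counts array
def pvLoopA (graph : List (Int × List Int)) (mx : Int) :
    List (Int × Int) → PySem.Set Int → List Int → List Int
  | [], _, counts => counts
  | (cur, t) :: rest, visited, counts =>
    if t ≤ mx then
      let counts' := pvIncAt counts t
      if PySem.Set.contains visited cur then
        pvLoopA graph mx rest visited counts'
      else
        pvLoopA graph mx
          (rest ++ ((PySem.Dict.mk graph).getD cur []).map (fun n => (n, t + 1)))
          (PySem.Set.add visited cur) counts'
    else pvLoopA graph mx rest visited counts
termination_by q visited _ => (pvUnvisKeys graph visited, q.length)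
decreasing_by
  · exact Prod.Lex.right _ (by simp)
  · by_cases hk : cur ∈ graph.map Prod.fst
    · exact Prod.Lex.left _ _ (pvUnvis_lt graph visited cur (by assumption) hk)
    · rw [pvUnvis_eq_of_not_key graph visited cur hk, pvGetD_nil graph cur hk]
      exact Prod.Lex.right _ (by simp)
  · exact Prod.Lex.right _ (by simp)

-- for i in range(1, max_transitions + 1): reachable_counts[i] += reachable_counts[i-1]
-- (i is always in range 1 ≤ i ≤ max < len, where .toNat indexing is exact)
def pvPrefA (mx : Int) (counts : List Int) : List Int :=
  (PySem.List.pyRange 1 (mx + 1)).foldl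
    (fun c i => c.set i.toNat (c.getD i.toNat 0 + c.getD (i - 1).toNat 0)) counts

def count_reachable_states (graph : List (Int × List Int)) (start_state : Int) (max_transitions : Int) : List Int :=
  pvPrefA max_transitions
    (pvLoopA graph max_transitions [(start_state, 0)] PySem.Set.empty
      (List.replicate (max_transitions + 1).toNat 0))

-- ===== PORT B =====
-- inner 'for v in graph.get(u, [])' of the BFS: returns (nodes appended to the queue, updated dist)
def pvDisc (du1 : Int) : List Int → PySem.Dict Int Int → List Int × PySem.Dict Int Int
  | [], dist => ([], dist)
  | v :: vs, dist =>
    if dist.contains v then pvDisc du1 vs dist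
    else
      let r := pvDisc du1 vs (dist.insert v du1)
      (v :: r.1, r.2)

-- termination-measure helpers for pvBfs: candidate nodes (all neighbour occurrences) not yet in dist
def pvCand (graph : List (Int × List Int)) : List Int := (graph.map Prod.snd).flatten

def pvFreshN (graph : List (Int × List Int)) (dist : PySem.Dict Int Int) : Nat :=
  ((pvCand graph).filter (fun x => !(dist.contains x))).length

theorem pvDisc_empty (du1 : Int) : ∀ (vs : List Int) (dist : PySem.Dict Int Int),
    (pvDisc du1 vs dist).1 = [] → (pvDisc du1 vs dist).2 = dist := by
  intro vs
  induction vs with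
  | nil => intro dist _; rfl
  | cons v t ih =>
    intro dist h
    by_cases hv : dist.contains v = true
    · simp only [pvDisc, if_pos hv] at h ⊢; exact ih dist h
    · simp [pvDisc, if_neg hv] at h

theorem pvDisc_mono (du1 : Int) : ∀ (vs : List Int) (dist : PySem.Dict Int Int) (x : Int),
    dist.contains x = true → (pvDisc du1 vs dist).2.contains x = true := by
  intro vs
  induction vs with
  | nil => intro dist x h; exact h
  | cons v t ih =>
    intro dist x h
    by_cases hv : dist.contains v = true
    · simp only [pvDisc, if_pos hv]; exact ih dist x h
    · simp only [pvDisc, if_neg hv]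
      exact ih _ x (by rw [PySem.Dict.contains_insert, h, Bool.or_true])

theorem pvNbrs_sub (graph : List (Int × List Int)) (u x : Int)
    (hx : x ∈ (PySem.Dict.mk graph).getD u []) : x ∈ pvCand graph := by
  by_cases hk : u ∈ graph.map Prod.fst
  · -- the value is some entry's neighbour list
    rcases hv : (PySem.Dict.mk graph).get? u with _ | v
    · rw [PySem.Dict.getD_eq_get?_getD, hv] at hx; simp at hx
    · rw [PySem.Dict.getD_eq_get?_getD, hv] at hx
      simp only [Option.getD_some] at hx
      -- get? = some v means v is the snd of some pair of graph
      have hmem : v ∈ graph.map Prod.snd := by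
        clear hk hx
        induction graph with
        | nil => simp [PySem.Dict.get?] at hv
        | cons p t ih =>
          rw [PySem.Dict.get?_mk_cons] at hv
          by_cases he : p.1 == u
          · rw [if_pos he] at hv
            exact (Option.some_inj.mp hv) ▸ List.mem_map_of_mem (List.mem_cons_self)
          · rw [if_neg he] at hv
            exact List.mem_cons_of_mem _ (ih hv)
      exact List.mem_flatten.mpr ⟨v, hmem, hx⟩
  · rw [pvGetD_nil graph u hk] at hx; cases hx

theorem pvDisc_progress (du1 : Int) : ∀ (vs : List Int) (dist : PySem.Dict Int Int),
    (pvDisc du1 vs dist).1 ≠ [] →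
    ∃ a, a ∈ vs ∧ dist.contains a = false ∧ (pvDisc du1 vs dist).2.contains a = true := by
  intro vs
  induction vs with
  | nil => intro dist h; exact absurd rfl h
  | cons v t ih =>
    intro dist h
    by_cases hv : dist.contains v = true
    · simp only [pvDisc, if_pos hv] at h ⊢
      obtain ⟨a, ha, hf, hc⟩ := ih dist h
      exact ⟨a, List.mem_cons_of_mem _ ha, hf, hc⟩
    · refine ⟨v, List.mem_cons_self, by simpa using hv, ?_⟩
      simp only [pvDisc, if_neg hv]
      exact pvDisc_mono du1 t _ v (PySem.Dict.contains_insert_self _ _ _)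

theorem pvFreshN_lt (graph : List (Int × List Int)) (dist dist' : PySem.Dict Int Int)
    (hmono : ∀ x, dist.contains x = true → dist'.contains x = true)
    (a : Int) (ha : a ∈ pvCand graph) (hf : dist.contains a = false)
    (hc : dist'.contains a = true) : pvFreshN graph dist' < pvFreshN graph dist := by
  apply pvFilter_length_lt (a := a) (p := fun x => !(dist.contains x))
      (q := fun x => !(dist'.contains x))
  · intro x hx
    simp only [Bool.not_eq_eq_eq_not, Bool.not_true] at hx ⊢
    cases h : dist.contains x with
    | false => rfl
    | true => rw [hmono x h] at hx; cases hx
  · exact ha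
  · simp [hf]
  · simp [hc]

-- the BFS while loop of B ('for u taken off the front of the queue'); dist[u] is ported as
-- getD u 0 — u is always a key of dist when dequeued
def pvBfs (graph : List (Int × List Int)) : List Int → PySem.Dict Int Int → PySem.Dict Int Int
  | [], dist => dist
  | u :: rest, dist =>
    pvBfs graph
      (rest ++ (pvDisc (dist.getD u 0 + 1) ((PySem.Dict.mk graph).getD u []) dist).1)
      (pvDisc (dist.getD u 0 + 1) ((PySem.Dict.mk graph).getD u []) dist).2
termination_by q dist => (pvFreshN graph dist, q.length)
decreasing_by
  by_cases h : (pvDisc (dist.getD u 0 + 1) ((PySem.Dict.mk graph).getD u []) dist).1 = []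
  · rw [pvDisc_empty _ _ _ h, h]
    exact Prod.Lex.right _ (by simp)
  · obtain ⟨a, ha, hf, hc⟩ := pvDisc_progress _ _ _ h
    exact Prod.Lex.left _ _ (pvFreshN_lt graph dist _
      (pvDisc_mono _ _ _) a (pvNbrs_sub graph u a ha) hf hc)

-- one step of the aggregation loop 'for u, d in dist.items()'; d + 1 is in range when it writes
def pvAggStep (graph : List (Int × List Int)) (mx : Int) (res : List Int) (p : Int × Int) : List Int :=
  if p.2 < mx then
    res.set (p.2 + 1).toNat (res.getD (p.2 + 1).toNat 0 + (((PySem.Dict.mk graph).getD p.1 []).length : Int))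
  else res

-- running-total accumulation (phase 3)
def pvPrefix : Int → List Int → List Int
  | _, [] => []
  | total, c :: cs => (total + c) :: pvPrefix (total + c) cs

def count_reachable_states_alt (graph : List (Int × List Int)) (start_state : Int) (max_transitions : Int) : List Int :=
  let dist := pvBfs graph [start_state] (PySem.Dict.mk [(start_state, 0)])
  let res0 := List.replicate (max_transitions + 1).toNat (0 : Int)
  let res1 := if 0 ≤ max_transitions then res0.set 0 1 else res0
  pvPrefix 0 (dist.items.foldl (pvAggStep graph max_transitions) res1)

-- ===== PRECONDITION & SPEC =====
def Spec_count_reachable_states (graph : List (Int × List Int)) (start_state : Int) (max_transitions : Int) (out : List Int) : Prop := out = count_reachable_states_alt graph start_state max_transitions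
instance (graph : List (Int × List Int)) (start_state : Int) (max_transitions : Int) (out : List Int) : Decidable (Spec_count_reachable_states graph start_state max_transitions out) := by unfold Spec_count_reachable_states; infer_instance

-- ===== CLAIM =====
def Claim_equal_count_reachable_states : Prop := ∀ (graph : List (Int × List Int)) (start_state : Int) (max_transitions : Int), Dom_count_reachable_states graph start_state max_transitions → Spec_count_reachable_states graph start_state max_transitions (count_reachable_states graph start_state max_transitions)

-- ===== LEMMAS AND PROOFS =====
-- Stage 1 (A side): A's loop equals a level-synchronous frontier iteration; its per-level sizes,
-- prefix-summed, are A's result.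

-- one BFS level of the intermediate: returns (next frontier, updated visited)
def pvStepLevel (graph : List (Int × List Int)) :
    List Int → PySem.Set Int → List Int × PySem.Set Int
  | [], visited => ([], visited)
  | u :: us, visited =>
    if PySem.Set.contains visited u then pvStepLevel graph us visited
    else
      let r := pvStepLevel graph us (PySem.Set.add visited u)
      (((PySem.Dict.mk graph).getD u []) ++ r.1, r.2)

-- the per-level size list for n levels
def pvLevels (graph : List (Int × List Int)) : Nat → List Int → PySem.Set Int → List Int
  | 0, _, _ => []
  | n + 1, frontier, visited =>
    let r := pvStepLevel graph frontier visited
    (frontier.length : Int) :: pvLevels graph n r.1 r.2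

-- "counts with n added at index d"
def pvAddN (c : List Int) (d : Int) (n : Nat) : List Int :=
  c.set d.toNat (c.getD d.toNat 0 + (n : Int))

-- "counts with the list ls added pointwise starting at index k"
def pvAddAt : List Int → Nat → List Int → List Int
  | c, _, [] => c
  | c, k, x :: xs => pvAddAt (c.set k (c.getD k 0 + x)) (k + 1) xs

theorem pvSet_getD_self (c : List Int) (k : Nat) : c.set k (c.getD k 0) = c := by
  by_cases h : k < c.length
  · rw [List.getD_eq_getElem?_getD, List.getElem?_eq_getElem h]
    exact List.set_getElem_self h
  · exact List.set_eq_of_length_le (by omega)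

theorem pvAddN_zero (c : List Int) (d : Int) : pvAddN c d 0 = c := by
  unfold pvAddN
  simpa using pvSet_getD_self c d.toNat

theorem pvAddN_inc (c : List Int) (d : Int) (n : Nat) :
    pvAddN (pvIncAt c d) d n = pvAddN c d (n + 1) := by
  unfold pvAddN pvIncAt
  by_cases h : d.toNat < c.length
  · rw [List.set_set]
    congr 1
    rw [List.getD_eq_getElem?_getD, List.getElem?_eq_getElem (by simpa using h),
        List.getElem_set_self (by simpa using h), List.getD_eq_getElem?_getD,
        List.getElem?_eq_getElem h]
    simp
    omega
  · rw [List.set_eq_of_length_le (l := c) (by omega)]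
    rw [List.set_eq_of_length_le (l := c) (by omega),
        List.set_eq_of_length_le (l := c) (by omega)]

theorem pvLoopA_drop (graph : List (Int × List Int)) (mx : Int) :
    ∀ (q : List (Int × Int)) (visited : PySem.Set Int) (counts : List Int),
      (∀ p ∈ q, mx < p.2) → pvLoopA graph mx q visited counts = counts := by
  intro q
  induction q with
  | nil => intro _ _ _; simp [pvLoopA]
  | cons hd tl ih =>
    intro visited counts h
    obtain ⟨cur, t⟩ := hd
    have ht : mx < t := h (cur, t) List.mem_cons_self
    simp only [pvLoopA, if_neg (by omega : ¬ t ≤ mx)]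
    exact ih visited counts (fun p hp => h p (List.mem_cons_of_mem _ hp))

theorem pvLevelStep (graph : List (Int × List Int)) (mx : Int) :
    ∀ (frontier : List Int) (acc : List (Int × Int)) (visited : PySem.Set Int)
      (counts : List Int) (d : Int), d ≤ mx →
      pvLoopA graph mx (frontier.map (fun s => (s, d)) ++ acc) visited counts =
      pvLoopA graph mx (acc ++ (pvStepLevel graph frontier visited).1.map (fun s => (s, d + 1)))
        (pvStepLevel graph frontier visited).2 (pvAddN counts d frontier.length) := by
  intro frontier
  induction frontier with
  | nil =>
    intro acc visited counts d _
    simp [pvStepLevel, pvAddN_zero]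
  | cons u us ih =>
    intro acc visited counts d hd
    simp only [List.map_cons, List.cons_append, pvLoopA, if_pos hd]
    by_cases hv : PySem.Set.contains visited u = true
    · rw [if_pos hv, ih acc visited (pvIncAt counts d) d hd]
      simp only [pvStepLevel, if_pos hv, List.length_cons]
      rw [pvAddN_inc]
    · rw [if_neg hv, List.append_assoc,
          ih (acc ++ ((PySem.Dict.mk graph).getD u []).map (fun n => (n, d + 1)))
             (PySem.Set.add visited u) (pvIncAt counts d) d hd]
      simp only [pvStepLevel, if_neg hv, List.length_cons, List.map_append, List.append_assoc]
      rw [pvAddN_inc]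

theorem pvLevels_length (graph : List (Int × List Int)) :
    ∀ (n : Nat) (frontier : List Int) (visited : PySem.Set Int),
      (pvLevels graph n frontier visited).length = n := by
  intro n
  induction n with
  | zero => intro _ _; rfl
  | succ n ih => intro f v; simp [pvLevels, ih]

theorem pvLoopA_levels (graph : List (Int × List Int)) (mx : Int) :
    ∀ (n : Nat) (frontier : List Int) (visited : PySem.Set Int) (counts : List Int) (d : Int),
      0 ≤ d → d + n = mx + 1 →
      pvLoopA graph mx (frontier.map (fun s => (s, d))) visited counts =
      pvAddAt counts d.toNat (pvLevels graph n frontier visited) := by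
  intro n
  induction n with
  | zero =>
    intro frontier visited counts d _ hsum
    simp only [Nat.cast_zero, add_zero] at hsum
    rw [pvLoopA_drop graph mx _ visited counts (by
      intro p hp
      obtain ⟨s, _, rfl⟩ := List.mem_map.mp hp
      simp; omega)]
    rfl
  | succ n ih =>
    intro frontier visited counts d hd hsum
    have hdm : d ≤ mx := by push_cast at hsum; omega
    rw [← List.append_nil (frontier.map (fun s => (s, d))),
        pvLevelStep graph mx frontier [] visited counts d hdm, List.nil_append,
        ih (pvStepLevel graph frontier visited).1 (pvStepLevel graph frontier visited).2
           (pvAddN counts d frontier.length) (d + 1) (by omega) (by push_cast at hsum ⊢; omega)]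
    have ht : (d + 1).toNat = d.toNat + 1 := by omega
    simp only [pvLevels, pvAddAt, pvAddN, ht]

theorem pvAddAt_replicate :
    ∀ (ls pre : List Int), pvAddAt (pre ++ List.replicate ls.length 0) pre.length ls = pre ++ ls := by
  intro ls
  induction ls with
  | nil => intro pre; simp [pvAddAt]
  | cons x xs ih =>
    intro pre
    simp only [List.length_cons, List.replicate_succ, pvAddAt]
    have hg : (pre ++ 0 :: List.replicate xs.length 0).getD pre.length 0 = 0 := by
      rw [List.getD_eq_getElem?_getD, List.getElem?_append_right (Nat.le_refl _)]
      simp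
    have hs : (pre ++ 0 :: List.replicate xs.length 0).set pre.length (0 + x)
        = (pre ++ [x]) ++ List.replicate xs.length 0 := by
      rw [List.set_append, if_neg (by omega)]
      simp
    rw [hg, hs]
    have := ih (pre ++ [x])
    simp only [List.length_append, List.length_cons, List.length_nil, Nat.zero_add] at this
    rw [this]
    simp

theorem pvPrefA_go :
    ∀ (c pre : List Int) (t : Int), pre ≠ [] → pre.getD (pre.length - 1) 0 = t →
      (PySem.List.pyRange (pre.length : Int) ((pre.length : Int) + c.length)).foldl
          (fun c i => c.set i.toNat (c.getD i.toNat 0 + c.getD (i - 1).toNat 0)) (pre ++ c)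
      = pre ++ pvPrefix t c := by
  intro c
  induction c with
  | nil =>
    intro pre t _ _
    have : PySem.List.pyRange (pre.length : Int) ((pre.length : Int) + ([] : List Int).length) = [] := by
      simp [PySem.List.pyRange]
    rw [this]
    simp [pvPrefix]
  | cons x xs ih =>
    intro pre t hne hlast
    have hpre : 1 ≤ pre.length := List.length_pos_of_ne_nil hne
    rw [PySem.List.pyRange_one_cons (by push_cast [List.length_cons]; omega)]
    simp only [List.foldl_cons]
    have h1 : ((pre.length : Int)).toNat = pre.length := by omega
    have h2 : ((pre.length : Int) - 1).toNat = pre.length - 1 := by omega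
    have hgx : (pre ++ x :: xs).getD pre.length 0 = x := by
      rw [List.getD_eq_getElem?_getD, List.getElem?_append_right (Nat.le_refl _)]
      simp
    have hgt : (pre ++ x :: xs).getD (pre.length - 1) 0 = t := by
      rw [List.getD_eq_getElem?_getD, List.getElem?_append_left (by omega)]
      rw [← List.getD_eq_getElem?_getD]
      exact hlast
    have hset : (pre ++ x :: xs).set pre.length (x + t) = (pre ++ [t + x]) ++ xs := by
      rw [List.set_append, if_neg (by omega)]
      simp [add_comm]
    rw [h1, h2, hgx, hgt, hset]
    have hrange : PySem.List.pyRange ((pre.length : Int) + 1) ((pre.length : Int) + (x :: xs).length)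
        = PySem.List.pyRange (((pre ++ [t + x]).length : Int)) (((pre ++ [t + x]).length : Int) + xs.length) := by
      congr 1 <;> · simp only [List.length_append, List.length_cons, List.length_nil]; omega
    rw [hrange, ih (pre ++ [t + x]) (t + x) (by simp) (by
      simp only [List.length_append, List.length_cons, List.length_nil, Nat.zero_add,
        Nat.add_sub_cancel]
      rw [List.getD_eq_getElem?_getD, List.getElem?_concat_length]
      rfl)]
    simp [pvPrefix]

theorem pvPref_eq (mx : Int) (sizes : List Int) (hm : 0 ≤ mx)
    (hlen : sizes.length = (mx + 1).toNat) : pvPrefA mx sizes = pvPrefix 0 sizes := by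
  obtain ⟨c0, cs, rfl⟩ : ∃ c0 cs, sizes = c0 :: cs := by
    cases h : sizes with
    | nil => rw [h] at hlen; simp at hlen; omega
    | cons a l => exact ⟨a, l, rfl⟩
  have hcs : (cs.length : Int) = mx := by
    have : cs.length + 1 = (mx + 1).toNat := by simpa using hlen
    omega
  unfold pvPrefA
  have hrange : PySem.List.pyRange 1 (mx + 1)
      = PySem.List.pyRange (([c0] : List Int).length : Int) ((([c0] : List Int).length : Int) + cs.length) := by
    congr 1
    simp only [List.length_cons, List.length_nil]
    omega
  rw [hrange]
  have := pvPrefA_go cs [c0] c0 (by simp) (by simp)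
  simp only [List.singleton_append] at this
  rw [this]
  simp [pvPrefix]

-- Stage 2 (B side): the distance table built by pvBfs, aggregated by pvAggStep, yields the same
-- per-level size list.

-- first-occurrence filter of a list against a boolean membership predicate
def pvFreshF : List Int → (Int → Bool) → List Int
  | [], _ => []
  | v :: vs, p => if p v then pvFreshF vs p else v :: pvFreshF vs (fun x => p x || (x == v))

theorem pvFreshF_congr : ∀ (l : List Int) (p q : Int → Bool),
    (∀ x, p x = q x) → pvFreshF l p = pvFreshF l q := by
  intro l
  induction l with
  | nil => intro _ _ _; rfl
  | cons v t ih =>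
    intro p q h
    simp only [pvFreshF, h v]
    by_cases hv : q v = true
    · rw [if_pos hv, if_pos hv]; exact ih p q h
    · rw [if_neg hv, if_neg hv]
      congr 1
      exact ih _ _ (fun x => by rw [h x])

theorem pvFreshF_append : ∀ (a b : List Int) (p : Int → Bool),
    pvFreshF (a ++ b) p = pvFreshF a p ++ pvFreshF b (fun x => p x || (pvFreshF a p).contains x) := by
  intro a
  induction a with
  | nil =>
    intro b p
    simp only [List.nil_append, pvFreshF]
    exact (pvFreshF_congr b _ p (fun x => by simp)).symm
  | cons v t ih =>
    intro b p
    by_cases hv : p v = true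
    · simp only [List.cons_append, pvFreshF, if_pos hv]
      exact ih b p
    · simp only [List.cons_append, pvFreshF, if_neg hv]
      rw [ih b _]
      simp only [List.cons.injEq, true_and]
      congr 1
      apply pvFreshF_congr
      intro x
      rw [List.contains_cons, ← Bool.or_assoc]

theorem pvSetContains_add (V : PySem.Set Int) (u x : Int) :
    (V.add u).contains x = (V.contains x || (x == u)) := by
  by_cases hx : x = u
  · subst hx
    rw [pvContains_add_self]
    simp
  · rw [pvContains_add_ne V u x hx]
    simp [hx]

theorem pvDictContains_insert (d : PySem.Dict Int Int) (v w x : Int) :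
    (d.insert v w).contains x = (d.contains x || (x == v)) := by
  rw [PySem.Dict.contains_insert, Bool.or_comm]

theorem pvStepLevel_fst (graph : List (Int × List Int)) :
    ∀ (F : List Int) (V : PySem.Set Int),
      (pvStepLevel graph F V).1
        = (pvFreshF F (fun x => V.contains x)).flatMap (fun u => (PySem.Dict.mk graph).getD u []) := by
  intro F
  induction F with
  | nil => intro V; rfl
  | cons u us ih =>
    intro V
    simp only [pvStepLevel, pvFreshF]
    by_cases hv : V.contains u = true
    · rw [if_pos hv, if_pos hv]
      exact ih V
    · rw [if_neg hv, if_neg hv]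
      simp only [List.flatMap_cons, ih (V.add u)]
      rw [pvFreshF_congr us (fun x => (PySem.Set.add V u).contains x)
            (fun x => V.contains x || (x == u)) (fun x => pvSetContains_add V u x)]

theorem pvStepLevel_snd (graph : List (Int × List Int)) :
    ∀ (F : List Int) (V : PySem.Set Int) (x : Int),
      (pvStepLevel graph F V).2.contains x
        = (V.contains x || (pvFreshF F (fun y => V.contains y)).contains x) := by
  intro F
  induction F with
  | nil => intro V x; simp [pvStepLevel, pvFreshF]
  | cons u us ih =>
    intro V x
    simp only [pvStepLevel, pvFreshF]
    by_cases hv : V.contains u = true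
    · rw [if_pos hv, if_pos hv]
      exact ih V x
    · rw [if_neg hv, if_neg hv]
      rw [ih (V.add u) x,
          pvFreshF_congr us (fun y => (PySem.Set.add V u).contains y)
            (fun y => V.contains y || (y == u)) (fun y => pvSetContains_add V u y),
          pvSetContains_add V u x, List.contains_cons]
      cases V.contains x <;> cases (x == u) <;> simp

theorem pvDisc_fst (du1 : Int) : ∀ (vs : List Int) (dist : PySem.Dict Int Int),
    (pvDisc du1 vs dist).1 = pvFreshF vs (fun x => dist.contains x) := by
  intro vs
  induction vs with
  | nil => intro dist; rfl
  | cons v t ih =>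
    intro dist
    simp only [pvDisc, pvFreshF]
    by_cases hv : dist.contains v = true
    · rw [if_pos hv, if_pos hv]
      exact ih dist
    · rw [if_neg hv, if_neg hv]
      simp only [ih (dist.insert v du1), List.cons.injEq, true_and]
      exact pvFreshF_congr t (fun x => (dist.insert v du1).contains x)
        (fun x => dist.contains x || (x == v)) (fun x => pvDictContains_insert dist v du1 x)

theorem pvDisc_contains (du1 : Int) : ∀ (vs : List Int) (dist : PySem.Dict Int Int) (x : Int),
    (pvDisc du1 vs dist).2.contains x
      = (dist.contains x || (pvFreshF vs (fun y => dist.contains y)).contains x) := by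
  intro vs
  induction vs with
  | nil => intro dist x; simp [pvDisc, pvFreshF]
  | cons v t ih =>
    intro dist x
    simp only [pvDisc, pvFreshF]
    by_cases hv : dist.contains v = true
    · rw [if_pos hv, if_pos hv]
      exact ih dist x
    · rw [if_neg hv, if_neg hv]
      rw [ih (dist.insert v du1) x,
          pvFreshF_congr t (fun y => (dist.insert v du1).contains y)
            (fun y => dist.contains y || (y == v)) (fun y => pvDictContains_insert dist v du1 y),
          pvDictContains_insert dist v du1 x, List.contains_cons]
      cases dist.contains x <;> cases (x == v) <;> simp

theorem pvDisc_items (du1 : Int) : ∀ (vs : List Int) (dist : PySem.Dict Int Int),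
    (pvDisc du1 vs dist).2.items
      = dist.items ++ (pvFreshF vs (fun x => dist.contains x)).map (fun v => (v, du1)) := by
  intro vs
  induction vs with
  | nil => intro dist; simp [pvDisc, pvFreshF]
  | cons v t ih =>
    intro dist
    simp only [pvDisc, pvFreshF]
    by_cases hv : dist.contains v = true
    · rw [if_pos hv, if_pos hv]
      exact ih dist
    · rw [if_neg hv, if_neg hv]
      rw [ih (dist.insert v du1),
          pvFreshF_congr t (fun x => (dist.insert v du1).contains x)
            (fun x => dist.contains x || (x == v)) (fun x => pvDictContains_insert dist v du1 x),
          PySem.Dict.items_insert_of_not_contains dist du1 (by simpa using hv)]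
      simp

theorem pvDisc_getD (du1 : Int) : ∀ (vs : List Int) (dist : PySem.Dict Int Int) (u : Int),
    dist.contains u = true → (pvDisc du1 vs dist).2.getD u 0 = dist.getD u 0 := by
  intro vs
  induction vs with
  | nil => intro dist u _; rfl
  | cons v t ih =>
    intro dist u hu
    simp only [pvDisc]
    by_cases hv : dist.contains v = true
    · rw [if_pos hv]; exact ih dist u hu
    · have hne : u ≠ v := fun he => by
        rw [Bool.not_eq_true] at hv
        rw [he, hv] at hu
        cases hu
      rw [if_neg hv]
      rw [ih (dist.insert v du1) u (by rw [pvDictContains_insert, hu, Bool.true_or]),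
          PySem.Dict.getD_insert_of_ne dist du1 0 hne]

theorem pvDisc_nodup (du1 : Int) : ∀ (vs : List Int) (dist : PySem.Dict Int Int),
    dist.keys.Nodup → (pvDisc du1 vs dist).2.keys.Nodup := by
  intro vs
  induction vs with
  | nil => intro dist h; exact h
  | cons v t ih =>
    intro dist h
    simp only [pvDisc]
    by_cases hv : dist.contains v = true
    · rw [if_pos hv]; exact ih dist h
    · rw [if_neg hv]
      exact ih _ (PySem.Dict.nodup_keys_insert _ _ _ h)

-- one whole level of pvBfs processed at once
def pvLE (graph : List (Int × List Int)) : List Int → PySem.Dict Int Int → List Int × PySem.Dict Int Int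
  | [], dist => ([], dist)
  | u :: us, dist =>
    let r := pvDisc (dist.getD u 0 + 1) ((PySem.Dict.mk graph).getD u []) dist
    let r2 := pvLE graph us r.2
    (r.1 ++ r2.1, r2.2)

theorem pvBfs_batch (graph : List (Int × List Int)) :
    ∀ (f g : List Int) (dist : PySem.Dict Int Int),
      pvBfs graph (f ++ g) dist = pvBfs graph (g ++ (pvLE graph f dist).1) (pvLE graph f dist).2 := by
  intro f
  induction f with
  | nil => intro g dist; simp [pvLE]
  | cons u us ih =>
    intro g dist
    rw [List.cons_append, pvBfs, List.append_assoc, ih]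
    simp only [pvLE, List.append_assoc]

theorem pvLE_nodup (graph : List (Int × List Int)) :
    ∀ (G : List Int) (dist : PySem.Dict Int Int),
      dist.keys.Nodup → (pvLE graph G dist).2.keys.Nodup := by
  intro G
  induction G with
  | nil => intro dist h; exact h
  | cons u us ih =>
    intro dist h
    simp only [pvLE]
    exact ih _ (pvDisc_nodup _ _ _ h)

theorem pvLE_empty (graph : List (Int × List Int)) :
    ∀ (G : List Int) (dist : PySem.Dict Int Int),
      (pvLE graph G dist).1 = [] → (pvLE graph G dist).2 = dist := by
  intro G
  induction G with
  | nil => intro dist _; rfl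
  | cons u us ih =>
    intro dist h
    simp only [pvLE, List.append_eq_nil_iff] at h ⊢
    rw [pvDisc_empty _ _ _ h.1] at h ⊢
    exact ih dist h.2

theorem pvLE_mono (graph : List (Int × List Int)) :
    ∀ (G : List Int) (dist : PySem.Dict Int Int) (x : Int),
      dist.contains x = true → (pvLE graph G dist).2.contains x = true := by
  intro G
  induction G with
  | nil => intro dist x h; exact h
  | cons u us ih =>
    intro dist x h
    simp only [pvLE]
    exact ih _ x (pvDisc_mono _ _ _ x h)

theorem pvLE_progress (graph : List (Int × List Int)) :
    ∀ (G : List Int) (dist : PySem.Dict Int Int), (pvLE graph G dist).1 ≠ [] →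
      ∃ a, a ∈ pvCand graph ∧ dist.contains a = false ∧ (pvLE graph G dist).2.contains a = true := by
  intro G
  induction G with
  | nil => intro dist h; exact absurd rfl h
  | cons u us ih =>
    intro dist h
    simp only [pvLE] at h ⊢
    by_cases hr : (pvDisc (dist.getD u 0 + 1) ((PySem.Dict.mk graph).getD u []) dist).1 = []
    · rw [hr, List.nil_append] at h
      obtain ⟨a, ha, hf, hc⟩ := ih _ h
      rw [pvDisc_empty _ _ _ hr] at hf hc ⊢
      exact ⟨a, ha, hf, hc⟩
    · obtain ⟨a, ha, hf, hc⟩ := pvDisc_progress _ _ _ hr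
      exact ⟨a, pvNbrs_sub graph u a ha, hf, pvLE_mono graph us _ a hc⟩

-- level characterisation of pvLE under the invariant that G is a uniform-depth frontier
theorem pvLE_char (graph : List (Int × List Int)) (k : Int) :
    ∀ (G : List Int) (dist : PySem.Dict Int Int),
      (∀ u ∈ G, dist.contains u = true ∧ dist.getD u 0 = k) →
      (pvLE graph G dist).1
          = pvFreshF (G.flatMap (fun u => (PySem.Dict.mk graph).getD u [])) (fun x => dist.contains x)
      ∧ (∀ x, (pvLE graph G dist).2.contains x = (dist.contains x || (pvLE graph G dist).1.contains x))
      ∧ (pvLE graph G dist).2.items = dist.items ++ (pvLE graph G dist).1.map (fun v => (v, k + 1)) := by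
  intro G
  induction G with
  | nil =>
    intro dist _
    refine ⟨rfl, fun x => by simp [pvLE], by simp [pvLE]⟩
  | cons u us ih =>
    intro dist hG
    obtain ⟨hcu, hgu⟩ := hG u List.mem_cons_self
    have hG' : ∀ u' ∈ us,
        (pvDisc (dist.getD u 0 + 1) ((PySem.Dict.mk graph).getD u []) dist).2.contains u' = true ∧
        (pvDisc (dist.getD u 0 + 1) ((PySem.Dict.mk graph).getD u []) dist).2.getD u' 0 = k := by
      intro u' hu'
      obtain ⟨hc, hg⟩ := hG u' (List.mem_cons_of_mem _ hu')
      exact ⟨pvDisc_mono _ _ _ u' hc, by rw [pvDisc_getD _ _ _ u' hc]; exact hg⟩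
    obtain ⟨ih1, ih2, ih3⟩ := ih _ hG'
    have hfst : (pvLE graph (u :: us) dist).1
        = pvFreshF ((u :: us).flatMap (fun w => (PySem.Dict.mk graph).getD w []))
            (fun x => dist.contains x) := by
      simp only [pvLE, List.flatMap_cons]
      rw [pvFreshF_append, ih1, pvDisc_fst]
      congr 1
      apply pvFreshF_congr
      intro x
      rw [pvDisc_contains]
    refine ⟨hfst, ?_, ?_⟩
    · intro x
      simp only [pvLE]
      rw [ih2 x, pvDisc_contains]
      show _ = (dist.contains x ||
        ((pvDisc (dist.getD u 0 + 1) ((PySem.Dict.mk graph).getD u []) dist).1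
          ++ (pvLE graph us (pvDisc (dist.getD u 0 + 1) ((PySem.Dict.mk graph).getD u []) dist).2).1).contains x)
      rw [List.contains_append, pvDisc_fst, Bool.or_assoc]
    · simp only [pvLE]
      rw [ih3, pvDisc_items, hgu]
      simp only [List.map_append, List.append_assoc, List.append_cancel_left_eq]
      rw [pvDisc_fst]

-- the future items appended by pvBfs from a uniform-depth frontier, level by level
def pvTail (graph : List (Int × List Int)) : List Int → PySem.Dict Int Int → Int → List (Int × Int)
  | G, dist, k =>
    if h : (pvLE graph G dist).1 = [] then []
    else (pvLE graph G dist).1.map (fun v => (v, k + 1))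
      ++ pvTail graph (pvLE graph G dist).1 (pvLE graph G dist).2 (k + 1)
termination_by G dist _ => pvFreshN graph dist
decreasing_by
  obtain ⟨a, ha, hf, hc⟩ := pvLE_progress graph G dist h
  exact pvFreshN_lt graph dist _ (pvLE_mono graph G dist) a ha hf hc

theorem pvTail_values (graph : List (Int × List Int)) :
    ∀ (N : Nat) (dist : PySem.Dict Int Int) (G : List Int) (k : Int),
      pvFreshN graph dist < N →
      ∀ p ∈ pvTail graph G dist k, k + 1 ≤ p.2 := by
  intro N
  induction N with
  | zero => intro dist _G _k h; omega
  | succ N ih =>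
    intro dist G k hN p hp
    rw [pvTail] at hp
    by_cases h : (pvLE graph G dist).1 = []
    · rw [dif_pos h] at hp; cases hp
    · rw [dif_neg h] at hp
      rcases List.mem_append.mp hp with hm | hm
      · obtain ⟨v, _, rfl⟩ := List.mem_map.mp hm
        omega
      · obtain ⟨a, ha, hf, hc⟩ := pvLE_progress graph G dist h
        have hlt : pvFreshN graph (pvLE graph G dist).2 < pvFreshN graph dist :=
          pvFreshN_lt graph dist _ (pvLE_mono graph G dist) a ha hf hc
        have := ih (pvLE graph G dist).2 (pvLE graph G dist).1 (k + 1) (by omega) p hm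
        omega

theorem pvBfs_items (graph : List (Int × List Int)) :
    ∀ (N : Nat) (dist : PySem.Dict Int Int) (G : List Int) (k : Int),
      pvFreshN graph dist < N →
      dist.keys.Nodup →
      (∀ u ∈ G, dist.contains u = true ∧ dist.getD u 0 = k) →
      (pvBfs graph G dist).items = dist.items ++ pvTail graph G dist k := by
  intro N
  induction N with
  | zero => intro dist _G _k h; omega
  | succ N ih =>
    intro dist G k hN hnd hG
    have hbatch := pvBfs_batch graph G [] dist
    rw [List.append_nil, List.nil_append] at hbatch
    by_cases h : (pvLE graph G dist).1 = []
    · rw [pvTail, dif_pos h, List.append_nil, hbatch, h, pvLE_empty graph G dist h]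
      simp [pvBfs]
    · obtain ⟨ch1, ch2, ch3⟩ := pvLE_char graph k G dist hG
      have hnd' : (pvLE graph G dist).2.keys.Nodup := pvLE_nodup graph G dist hnd
      have hG' : ∀ u ∈ (pvLE graph G dist).1,
          (pvLE graph G dist).2.contains u = true ∧ (pvLE graph G dist).2.getD u 0 = k + 1 := by
        intro u hu
        have hmem : (u, k + 1) ∈ (pvLE graph G dist).2.items := by
          rw [ch3]
          exact List.mem_append_right _ (List.mem_map.mpr ⟨u, hu, rfl⟩)
        refine ⟨?_, PySem.Dict.getD_of_mem_items _ hmem hnd' 0⟩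
        rw [PySem.Dict.contains_iff_mem_keys]
        exact PySem.Dict.mem_keys_of_mem_items _ hmem
      obtain ⟨a, ha, hf, hc⟩ := pvLE_progress graph G dist h
      have hlt : pvFreshN graph (pvLE graph G dist).2 < pvFreshN graph dist :=
        pvFreshN_lt graph dist _ (pvLE_mono graph G dist) a ha hf hc
      rw [hbatch, ih _ _ (k + 1) (by omega) hnd' hG', ch3, List.append_assoc]
      conv_rhs => rw [pvTail]
      rw [dif_neg h]

theorem pvAgg_noop (graph : List (Int × List Int)) (mx : Int) :
    ∀ (L : List (Int × Int)) (arr : List Int),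
      (∀ p ∈ L, ¬ p.2 < mx) → L.foldl (pvAggStep graph mx) arr = arr := by
  intro L
  induction L with
  | nil => intro arr _; rfl
  | cons p t ih =>
    intro arr h
    rw [List.foldl_cons]
    rw [show pvAggStep graph mx arr p = arr from
      by unfold pvAggStep; rw [if_neg (h p List.mem_cons_self)]]
    exact ih arr (fun q hq => h q (List.mem_cons_of_mem _ hq))

theorem pvAgg_nil (graph : List (Int × List Int)) (mx : Int) :
    ∀ (L : List (Int × Int)), L.foldl (pvAggStep graph mx) [] = [] := by
  intro L
  induction L with
  | nil => rfl
  | cons p t ih =>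
    rw [List.foldl_cons]
    rw [show pvAggStep graph mx [] p = [] from by unfold pvAggStep; split <;> simp]
    exact ih

theorem pvAgg_seg (graph : List (Int × List Int)) (mx : Int) (d : Int) (hlt : d < mx) :
    ∀ (L : List Int) (pre tail : List Int) (z : Int), (d + 1).toNat = pre.length →
      (L.map (fun v => (v, d))).foldl (pvAggStep graph mx) (pre ++ z :: tail)
        = pre ++ (z + (L.map (fun u => (((PySem.Dict.mk graph).getD u []).length : Int))).sum) :: tail := by
  intro L
  induction L with
  | nil => intro pre tail z _; simp
  | cons u t ih =>
    intro pre tail z hidx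
    rw [List.map_cons, List.foldl_cons]
    have hstep : pvAggStep graph mx (pre ++ z :: tail) (u, d)
        = pre ++ (z + (((PySem.Dict.mk graph).getD u []).length : Int)) :: tail := by
      unfold pvAggStep
      rw [if_pos (by exact hlt)]
      have hg : (pre ++ z :: tail).getD (d + 1).toNat 0 = z := by
        rw [hidx, List.getD_eq_getElem?_getD, List.getElem?_append_right (Nat.le_refl _)]
        simp
      have hs : (pre ++ z :: tail).set (d + 1).toNat
            (z + (((PySem.Dict.mk graph).getD u []).length : Int))
          = pre ++ (z + (((PySem.Dict.mk graph).getD u []).length : Int)) :: tail := by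
        rw [hidx, List.set_append, if_neg (by omega)]
        simp
      rw [hg, hs]
    rw [hstep, ih pre tail _ hidx, List.map_cons, List.sum_cons]
    congr 2
    omega

theorem pvLenFlatMap (graph : List (Int × List Int)) (L : List Int) :
    ((L.flatMap (fun u => (PySem.Dict.mk graph).getD u [])).length : Int)
      = (L.map (fun u => (((PySem.Dict.mk graph).getD u []).length : Int))).sum := by
  induction L with
  | nil => simp
  | cons a t ih =>
    simp only [List.flatMap_cons, List.length_append, List.map_cons, List.sum_cons,
      Nat.cast_add, ih]

theorem pvLevels_nil (graph : List (Int × List Int)) :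
    ∀ (n : Nat) (V : PySem.Set Int), pvLevels graph n [] V = List.replicate n 0 := by
  intro n
  induction n with
  | zero => intro V; rfl
  | succ n ih => intro V; simp [pvLevels, pvStepLevel, ih, List.replicate_succ]

theorem pvSizes (graph : List (Int × List Int)) (mx : Int) :
    ∀ (r : Nat) (G : List Int) (dist : PySem.Dict Int Int) (k : Int)
      (Fa : List Int) (Va : PySem.Set Int) (pre : List Int),
      dist.keys.Nodup →
      (∀ u ∈ G, dist.contains u = true ∧ dist.getD u 0 = k) →
      Fa = G.flatMap (fun u => (PySem.Dict.mk graph).getD u []) →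
      (∀ x, Va.contains x = dist.contains x) →
      0 ≤ k → (pre.length : Int) = k + 2 → k + 1 + r = mx →
      (pvTail graph G dist k).foldl (pvAggStep graph mx) (pre ++ List.replicate r 0)
        = pre ++ pvLevels graph r (pvStepLevel graph Fa Va).1 (pvStepLevel graph Fa Va).2 := by
  intro r
  induction r with
  | zero =>
    intro G dist k Fa Va pre hnd hG hFa hV hk hlen hr
    simp only [Nat.cast_zero, add_zero] at hr
    rw [List.replicate_zero, List.append_nil, pvLevels, List.append_nil]
    apply pvAgg_noop
    intro p hp
    have := pvTail_values graph (pvFreshN graph dist + 1) dist G k (by omega) p hp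
    omega
  | succ r ih =>
    intro G dist k Fa Va pre hnd hG hFa hV hk hlen hr
    obtain ⟨ch1, ch2, ch3⟩ := pvLE_char graph k G dist hG
    have hGF : (pvLE graph G dist).1
        = pvFreshF Fa (fun y => Va.contains y) := by
      rw [ch1, hFa]
      exact (pvFreshF_congr _ _ _ hV).symm
    have hFa' : (pvStepLevel graph Fa Va).1
        = (pvLE graph G dist).1.flatMap (fun u => (PySem.Dict.mk graph).getD u []) := by
      rw [pvStepLevel_fst, hGF]
    by_cases h : (pvLE graph G dist).1 = []
    · rw [pvTail, dif_pos h, List.foldl_nil, hFa', h]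
      simp only [List.flatMap_nil, pvLevels_nil]
    · rw [pvTail, dif_neg h, List.foldl_append]
      have hseg := pvAgg_seg graph mx (k + 1) (by push_cast at hr; omega)
        (pvLE graph G dist).1 pre (List.replicate r 0) 0 (by omega)
      rw [List.replicate_succ, hseg, zero_add, List.append_cons]
      have hnd' : (pvLE graph G dist).2.keys.Nodup := pvLE_nodup graph G dist hnd
      have hG' : ∀ u ∈ (pvLE graph G dist).1,
          (pvLE graph G dist).2.contains u = true ∧ (pvLE graph G dist).2.getD u 0 = k + 1 := by
        intro u hu
        have hmem : (u, k + 1) ∈ (pvLE graph G dist).2.items := by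
          rw [ch3]
          exact List.mem_append_right _ (List.mem_map.mpr ⟨u, hu, rfl⟩)
        refine ⟨?_, PySem.Dict.getD_of_mem_items _ hmem hnd' 0⟩
        rw [PySem.Dict.contains_iff_mem_keys]
        exact PySem.Dict.mem_keys_of_mem_items _ hmem
      have hV' : ∀ x, (pvStepLevel graph Fa Va).2.contains x = (pvLE graph G dist).2.contains x := by
        intro x
        rw [pvStepLevel_snd, ch2 x, hGF, hV x]
      have := ih (pvLE graph G dist).1 (pvLE graph G dist).2 (k + 1)
        (pvStepLevel graph Fa Va).1 (pvStepLevel graph Fa Va).2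
        (pre ++ [(((pvLE graph G dist).1.flatMap (fun u => (PySem.Dict.mk graph).getD u [])).length : Int)])
        hnd' hG' hFa' hV' (by omega)
        (by rw [List.length_append]; push_cast; simp only [List.length_cons, List.length_nil]; omega)
        (by push_cast at hr ⊢; omega)
      rw [pvLenFlatMap] at this
      rw [this]
      rw [pvLevels]
      simp only [List.append_assoc, List.cons_append, List.nil_append, hFa']
      rw [pvLenFlatMap]

theorem pvD0_contains (s x : Int) :
    (PySem.Dict.mk [(s, (0:Int))]).contains x = (x == s) := by
  rw [PySem.Dict.contains_mk]
  by_cases h : x = s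
  · subst h; simp
  · simp [h, Ne.symm h]

theorem pvD0_hG (s : Int) :
    ∀ u ∈ [s], (PySem.Dict.mk [(s, (0:Int))]).contains u = true ∧
      (PySem.Dict.mk [(s, (0:Int))]).getD u 0 = 0 := by
  intro u hu
  rw [List.mem_singleton] at hu
  subst hu
  constructor
  · rw [pvD0_contains]; simp
  · rw [PySem.Dict.getD_eq_get?_getD, PySem.Dict.get?_mk_cons]
    simp

theorem pvD0_nodup (s : Int) :
    (PySem.Dict.mk [(s, (0:Int))]).keys.Nodup := by
  simp

theorem pvStep_start (graph : List (Int × List Int)) (s : Int) :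
    pvStepLevel graph [s] PySem.Set.empty
      = ([s].flatMap (fun u => (PySem.Dict.mk graph).getD u []), PySem.Set.add PySem.Set.empty s) := by
  simp [pvStepLevel]

theorem pv_fold_levels (graph : List (Int × List Int)) (s mx : Int) (hm : 0 ≤ mx) :
    ((pvBfs graph [s] (PySem.Dict.mk [(s, 0)])).items).foldl (pvAggStep graph mx)
        ((List.replicate (mx + 1).toNat (0:Int)).set 0 1)
      = pvLevels graph (mx + 1).toNat [s] PySem.Set.empty := by
  rw [pvBfs_items graph (pvFreshN graph (PySem.Dict.mk [(s, 0)]) + 1) _ [s] 0 (by omega)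
      (pvD0_nodup s) (pvD0_hG s)]
  have hitems : (PySem.Dict.mk [(s, (0:Int))]).items = [(s, 0)] := rfl
  rw [hitems]
  have hrepl : (mx + 1).toNat = mx.toNat + 1 := by omega
  rw [hrepl, List.replicate_succ]
  have hset : ((0:Int) :: List.replicate mx.toNat 0).set 0 1 = 1 :: List.replicate mx.toNat 0 := rfl
  rw [hset, List.singleton_append, List.foldl_cons]
  by_cases h0 : mx = 0
  · subst h0
    have hstep : pvAggStep graph 0 (1 :: List.replicate (0:Int).toNat 0) (s, 0)
        = [1] := by unfold pvAggStep; rw [if_neg (by omega)]; rfl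
    rw [hstep, pvAgg_noop graph 0 _ _ (by
      intro p hp
      have := pvTail_values graph (pvFreshN graph (PySem.Dict.mk [(s, 0)]) + 1) _ [s] 0
        (by omega) p hp
      omega)]
    simp [pvLevels]
  · -- 1 ≤ mx
    have hm1 : 1 ≤ mx := by omega
    have hrepl2 : mx.toNat = (mx - 1).toNat + 1 := by omega
    have hstep : pvAggStep graph mx (1 :: List.replicate mx.toNat 0) (s, 0)
        = [1, (((PySem.Dict.mk graph).getD s []).length : Int)] ++ List.replicate (mx - 1).toNat 0 := by
      unfold pvAggStep
      rw [if_pos (by omega : (0:Int) < mx)]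
      rw [hrepl2, List.replicate_succ]
      show (1 :: (0:Int) :: List.replicate (mx - 1).toNat 0).set (0 + 1 : Int).toNat
          ((1 :: (0:Int) :: List.replicate (mx - 1).toNat 0).getD (0 + 1 : Int).toNat 0 + _) = _
      norm_num
    rw [hstep]
    have hsz := pvSizes graph mx (mx - 1).toNat [s] (PySem.Dict.mk [(s, 0)]) 0
      ([s].flatMap (fun u => (PySem.Dict.mk graph).getD u []))
      (PySem.Set.add PySem.Set.empty s)
      [1, (((PySem.Dict.mk graph).getD s []).length : Int)]
      (pvD0_nodup s) (pvD0_hG s) rfl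
      (by
        intro x
        rw [pvSetContains_add, pvD0_contains]
        have he : PySem.Set.contains PySem.Set.empty x = false := rfl
        rw [he, Bool.false_or])
      le_rfl (by simp) (by omega)
    rw [hsz]
    rw [hrepl2, pvLevels, pvStep_start graph s, pvLevels]
    simp

theorem pv_main (graph : List (Int × List Int)) (s mx : Int) :
    count_reachable_states graph s mx = count_reachable_states_alt graph s mx := by
  show pvPrefA mx (pvLoopA graph mx [(s, 0)] PySem.Set.empty (List.replicate (mx + 1).toNat 0))
      = pvPrefix 0 (((pvBfs graph [s] (PySem.Dict.mk [(s, 0)])).items).foldl (pvAggStep graph mx)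
          (if 0 ≤ mx then (List.replicate (mx + 1).toNat (0:Int)).set 0 1
           else List.replicate (mx + 1).toNat 0))
  by_cases hm : 0 ≤ mx
  · rw [if_pos hm, pv_fold_levels graph s mx hm]
    have hq : [((s : Int), (0:Int))] = [s].map (fun x => (x, (0:Int))) := rfl
    rw [hq, pvLoopA_levels graph mx (mx + 1).toNat [s] PySem.Set.empty _ 0 le_rfl (by omega)]
    have hadd : pvAddAt (List.replicate (mx + 1).toNat 0) (0 : Int).toNat
        (pvLevels graph (mx + 1).toNat [s] PySem.Set.empty)
        = pvLevels graph (mx + 1).toNat [s] PySem.Set.empty := by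
      have := pvAddAt_replicate (pvLevels graph (mx + 1).toNat [s] PySem.Set.empty) []
      simp only [List.nil_append, List.length_nil] at this
      rw [pvLevels_length graph (mx + 1).toNat [s] PySem.Set.empty] at this
      simpa using this
    rw [hadd]
    exact pvPref_eq mx _ hm (pvLevels_length graph _ _ _)
  · have h0 : (mx + 1).toNat = 0 := by omega
    rw [if_neg hm, h0]
    rw [pvLoopA_drop graph mx [(s, 0)] PySem.Set.empty (List.replicate 0 0) (by
      intro p hp
      rw [List.mem_singleton] at hp
      subst hp
      show mx < (0 : Int)
      omega)]
    rw [List.replicate_zero, pvAgg_nil]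
    unfold pvPrefA
    have hr : PySem.List.pyRange 1 (mx + 1) = [] := by
      simp [PySem.List.pyRange]
      omega
    rw [hr]
    rfl

-- ===== VERDICT =====
theorem count_reachable_states_spec : Claim_equal_count_reachable_states := by
  intro graph s m _
  unfold Spec_count_reachable_states
  exact pv_main graph s m
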